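-- pv_equiv track=rewrite | github.com/lukaslao/POKER10JQKA | pokerlogic.py | maoparrank
-- ===== SOURCE A (Python) =====
-- def parrank(r, n) :
--
--     """Defining the RANK of the PAIRS
--     RANK RANGES (1pair) from 150 to 164 so it wins of HIGHCARD(ACE is 140)
--     RANK RANGES (2pair) from 301 to 325 so it wins of a PAIR
--     PAIR OF 2's = 150, PAIR of ACES = 164
--     TWO PAIRS,  SUM of two pairs  e.g: 2 and 2 = 150 + 4 and 4 = 152 = 302
--     Highets two pair possible ACE/ACE KING/KING = 163 + 162 = 325
--     FOUR OF a KIND(2 pairs equals) are another function"""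
--
--     pares = []
--     for p, q in zip(r, n) :
--         if r.count(p) == 2:
--             pares.append(p)
--     pares.sort(reverse=True)
--     return pares
--
-- def maoparrank(m, r, n):
--
--     """Continues the last function"""
--
--     if m[1] == 1:
--         rank = 0
--         pares = parrank(r, n)
--         numero = list(range(20,141,10))
--         rankpar = list(range(150,164))
--         rankmao = 0
--         for n, r in zip(numero, rankpar):
--             if pares[0] == n:
--                 rankmao = r
--     elif m[1] == 2:
--         rank = 0
--         pares = parrank(r, n)
--         numero = list(range(20,141,10))
--         rankpar = list(range(150,164))
--         rankmao = 0
--         for n, r in zip(numero, rankpar):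
--             if pares[0] == n:
--                 rankmao = r
--         for n, r in zip(numero, rankpar):
--             if pares[2] == n:
--                 rankmao = rankmao + r
--     else:
--         rankmao = 0
--     return rankmao
-- ===== SOURCE B (Python) =====
-- def _cardrank(v):
--     """Closed-form card-value -> pair-rank converter: 20..140 in steps of 10
--     map to 150..162; anything else contributes 0."""
--     if 20 <= v <= 140 and (v - 20) % 10 == 0:
--         return 150 + (v - 20) // 10
--     return 0
--
--
-- def maoparrank(m, r, n):
--     code = m[1]
--     if code != 1 and code != 2:
--         return 0
--     cnt = {}
--     for v in r:
--         cnt[v] = cnt.get(v, 0) + 1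
--     pares = sorted((v for v, _ in zip(r, n) if cnt[v] == 2), reverse=True)
--     if code == 1:
--         return _cardrank(pares[0])
--     return _cardrank(pares[0]) + _cardrank(pares[2])
-- ===== Notes on version B (the rewrite author's own statement) =====
-- stated objective: simpler
-- what changed: Replaced the two table-scan loops over zip(range(20,141,10), range(150,164)) with a closed-form arithmetic rank converter, and replaced the quadratic r.count(p) inner scan with a count dictionary built in one pass.
import Mathlib
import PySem

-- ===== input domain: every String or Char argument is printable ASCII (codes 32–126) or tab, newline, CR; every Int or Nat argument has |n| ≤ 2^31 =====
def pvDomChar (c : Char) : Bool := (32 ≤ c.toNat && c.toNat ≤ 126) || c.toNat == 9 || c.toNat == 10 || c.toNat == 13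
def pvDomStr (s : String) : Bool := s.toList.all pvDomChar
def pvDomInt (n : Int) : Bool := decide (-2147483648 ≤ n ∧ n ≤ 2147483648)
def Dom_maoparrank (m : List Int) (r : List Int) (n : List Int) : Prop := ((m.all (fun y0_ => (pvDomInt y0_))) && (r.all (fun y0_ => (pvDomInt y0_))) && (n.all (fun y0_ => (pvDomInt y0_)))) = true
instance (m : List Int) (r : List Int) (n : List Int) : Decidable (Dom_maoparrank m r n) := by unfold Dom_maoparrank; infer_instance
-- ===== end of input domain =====

-- B replaces A's two table-scan loops with a closed-form rank converter and A's
-- quadratic r.count inner scan with a count dictionary built in one pass (simpler).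

-- ===== PORT A =====
def parrank (r : List Int) (n : List Int) : List Int :=
  let pares := (r.zip n).foldl
    (fun acc pq => if r.count pq.1 = 2 then acc ++ [pq.1] else acc) []
  PySem.List.sorted pares (fun x => x) true

def maoparrank (m : List Int) (r : List Int) (n : List Int) : Int :=
  let m1 := PySem.List.pyGetD m 1 0        -- m[1]; Pre_ guarantees the index is in range
  if m1 = 1 then
    let pares := parrank r n
    let numero := PySem.List.pyRange 20 141 10
    let rankpar := PySem.List.pyRange 150 164 1
    (numero.zip rankpar).foldl
      (fun rankmao nr => if PySem.List.pyGetD pares 0 0 = nr.1 then nr.2 else rankmao) 0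
  else if m1 = 2 then
    let pares := parrank r n
    let numero := PySem.List.pyRange 20 141 10
    let rankpar := PySem.List.pyRange 150 164 1
    let rankmao := (numero.zip rankpar).foldl
      (fun rankmao nr => if PySem.List.pyGetD pares 0 0 = nr.1 then nr.2 else rankmao) 0
    (numero.zip rankpar).foldl
      (fun rankmao nr => if PySem.List.pyGetD pares 2 0 = nr.1 then rankmao + nr.2 else rankmao) rankmao
  else 0

-- ===== PORT B =====
def cardrank (v : Int) : Int :=
  if 20 ≤ v ∧ v ≤ 140 ∧ PySem.Int.mod (v - 20) 10 = 0 then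
    150 + PySem.Int.floordiv (v - 20) 10
  else 0

def maoparrank_alt (m : List Int) (r : List Int) (n : List Int) : Int :=
  let code := PySem.List.pyGetD m 1 0      -- m[1]; Pre_ guarantees the index is in range
  if code ≠ 1 ∧ code ≠ 2 then 0
  else
    let cnt := r.foldl (fun d v => d.insert v (d.getD v 0 + 1))
      (PySem.Dict.empty : PySem.Dict Int Int)
    let pares := PySem.List.sorted
      (((r.zip n).map Prod.fst).filter (fun v => cnt.getD v 0 = 2)) (fun x => x) true
    if code = 1 then cardrank (PySem.List.pyGetD pares 0 0)
    else cardrank (PySem.List.pyGetD pares 0 0) + cardrank (PySem.List.pyGetD pares 2 0)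

-- ===== PRECONDITION & SPEC =====
-- the paired values (in zip order) both Pythons collect before sorting
def paresSpec (r : List Int) (n : List Int) : List Int :=
  ((r.zip n).map Prod.fst).filter (fun v => r.count v = 2)

-- Pre_ excludes exactly the inputs where the Python A raises IndexError: len(m) < 2
-- (m[1]), or m[1]==1 with no paired entry (pares[0]), or m[1]==2 with fewer than
-- three paired entries (pares[2]).  B raises the same IndexError there.
def Pre_maoparrank (m : List Int) (r : List Int) (n : List Int) : Prop :=
  2 ≤ m.length ∧
  (m.getD 1 0 = 1 → paresSpec r n ≠ []) ∧
  (m.getD 1 0 = 2 → 3 ≤ (paresSpec r n).length)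

instance (m : List Int) (r : List Int) (n : List Int) : Decidable (Pre_maoparrank m r n) := by
  unfold Pre_maoparrank; infer_instance

def pvWitness_maoparrank : List Int × List Int × List Int := ([0, 1], [20, 20, 30], [1, 2, 3])

def Spec_maoparrank (m : List Int) (r : List Int) (n : List Int) (out : Int) : Prop :=
  out = maoparrank_alt m r n
instance (m : List Int) (r : List Int) (n : List Int) (out : Int) :
    Decidable (Spec_maoparrank m r n out) := by unfold Spec_maoparrank; infer_instance

-- ===== CLAIM (what is proved, stated in full; the proofs are below) =====
def Claim_equal_maoparrank : Prop :=
  ∀ (m : List Int) (r : List Int) (n : List Int),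
    Dom_maoparrank m r n → Pre_maoparrank m r n → Spec_maoparrank m r n (maoparrank m r n)

-- ===== LEMMAS AND PROOFS =====

-- both ports sort the same list of paired values
theorem pares_eq (r n : List Int) :
    parrank r n =
      PySem.List.sorted
        (((r.zip n).map Prod.fst).filter
          (fun v => (r.foldl (fun d v => d.insert v (d.getD v 0 + 1))
              (PySem.Dict.empty : PySem.Dict Int Int)).getD v 0 = 2)) (fun x => x) true := by
  unfold parrank
  have hcnt : ∀ v : Int,
      (r.foldl (fun d v => d.insert v (d.getD v 0 + 1))
        (PySem.Dict.empty : PySem.Dict Int Int)).getD v 0 = (r.count v : Int) := by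
    intro v
    rw [PySem.Dict.getD_foldl_insert_add_one, PySem.Dict.getD_empty]
    ring
  have hA : (r.zip n).foldl
      (fun acc pq => if r.count pq.1 = 2 then acc ++ [pq.1] else acc) []
      = List.map Prod.fst (List.filter (fun pq => decide (r.count pq.1 = 2)) (r.zip n)) := by
    have := PySem.List.foldl_append_if
      (fun pq : Int × Int => decide (r.count pq.1 = 2)) Prod.fst (r.zip n) []
    simpa using this
  have hfilt : List.filter (fun pq : Int × Int => decide (r.count pq.1 = 2)) (r.zip n)
      = List.filter ((fun v => decide ((r.foldl (fun d v => d.insert v (d.getD v 0 + 1))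
          (PySem.Dict.empty : PySem.Dict Int Int)).getD v 0 = 2)) ∘ Prod.fst) (r.zip n) := by
    apply List.filter_congr
    intro pq _
    simp [hcnt pq.1]
    omega
  rw [hA, List.filter_map, hfilt]

-- the fold that OVERWRITES rankmao on a hit over the literal rank table is cardrank
set_option maxHeartbeats 2000000 in
theorem owfold_eq (x : Int) :
    ((PySem.List.pyRange 20 141 10).zip (PySem.List.pyRange 150 164 1)).foldl
      (fun rankmao nr => if x = nr.1 then nr.2 else rankmao) 0 = cardrank x := by
  have hL : (PySem.List.pyRange 20 141 10).zip (PySem.List.pyRange 150 164 1)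
      = [(20,150),(30,151),(40,152),(50,153),(60,154),(70,155),(80,156),(90,157),
         (100,158),(110,159),(120,160),(130,161),(140,162)] := by decide
  rw [hL]
  unfold cardrank
  rw [PySem.Int.mod_eq_emod_of_pos (by norm_num), PySem.Int.floordiv_eq_ediv_of_pos (by norm_num)]
  simp only [List.foldl_cons, List.foldl_nil]
  split_ifs <;> omega

-- neither fold moves when x is not among the table's first components
theorem addfold_no_match (l : List (Int × Int)) (x init : Int)
    (h : x ∉ l.map Prod.fst) :
    l.foldl (fun rankmao nr => if x = nr.1 then rankmao + nr.2 else rankmao) init = init := by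
  induction l generalizing init with
  | nil => rfl
  | cons p t ih =>
    simp only [List.map_cons, List.mem_cons, not_or] at h
    simp only [List.foldl_cons, if_neg h.1]
    exact ih init h.2

theorem owfold_no_match (l : List (Int × Int)) (x init : Int)
    (h : x ∉ l.map Prod.fst) :
    l.foldl (fun rankmao nr => if x = nr.1 then nr.2 else rankmao) init = init := by
  induction l generalizing init with
  | nil => rfl
  | cons p t ih =>
    simp only [List.map_cons, List.mem_cons, not_or] at h
    simp only [List.foldl_cons, if_neg h.1]
    exact ih init h.2

-- over a table with distinct first components the ADD fold is init + the OVERWRITE fold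
theorem addfold_eq_owfold (l : List (Int × Int)) (x init : Int)
    (hnd : (l.map Prod.fst).Nodup) :
    l.foldl (fun rankmao nr => if x = nr.1 then rankmao + nr.2 else rankmao) init
      = init + l.foldl (fun rankmao nr => if x = nr.1 then nr.2 else rankmao) 0 := by
  induction l generalizing init with
  | nil => simp
  | cons p t ih =>
    simp only [List.map_cons, List.nodup_cons] at hnd
    simp only [List.foldl_cons]
    by_cases h : x = p.1
    · rw [if_pos h, if_pos h,
        addfold_no_match t x (init + p.2) (h ▸ hnd.1),
        owfold_no_match t x p.2 (h ▸ hnd.1)]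
    · rw [if_neg h, if_neg h]
      exact ih init hnd.2

set_option maxHeartbeats 2000000 in
theorem addfold_eq_cardrank (x init : Int) :
    ((PySem.List.pyRange 20 141 10).zip (PySem.List.pyRange 150 164 1)).foldl
      (fun rankmao nr => if x = nr.1 then rankmao + nr.2 else rankmao) init
      = init + cardrank x := by
  rw [addfold_eq_owfold _ _ _ (by decide), owfold_eq]

-- ===== VERDICT (by name: the statement is the Claim_ definition above) =====
theorem maoparrank_spec : Claim_equal_maoparrank := by
  intro m r n _ _
  unfold Spec_maoparrank maoparrank maoparrank_alt
  simp only [pares_eq]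
  by_cases h1 : PySem.List.pyGetD m 1 0 = 1
  · simp only [h1]
    norm_num [owfold_eq]
  · by_cases h2 : PySem.List.pyGetD m 1 0 = 2
    · simp only [h2]
      norm_num [owfold_eq, addfold_eq_cardrank]
    · simp only [if_neg h1, if_neg h2, if_pos (⟨h1, h2⟩ : _ ∧ _)]
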